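-- pv_equiv track=rewrite | github.com/C1ey/Secret-s-pi-codes | Secret_s_pi_codes.py | findSecrets1
-- ===== SOURCE A (Python) =====
-- def findSecrets1(arr, queries):
--     result=[]
--     n=len(arr)
--     for i, j in queries:
--         product=1
--         for index in range(i, j+1):
--             if i==(j+1):
--                 product.append(i)
--             else:
--                 product *=arr[index]
--             result.append(product)
--     return result
-- ===== SOURCE B (Python) =====
-- def findSecrets1(arr, queries):
--     # Stateless strategy: each output is the product of arr[i..i+k] computed
--     # from scratch, with no running accumulator carried between outputs.
--     def range_product(i, count):
--         p = 1
--         for t in range(count):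
--             p *= arr[i + t]
--         return p
--
--     result = []
--     for i, j in queries:
--         result += [range_product(i, k + 1) for k in range(j - i + 1)]
--     return result
-- ===== Notes on version B (the rewrite author's own statement) =====
-- stated objective: alternative
-- what changed: B drops A's running-product accumulator entirely: each output element is the product of its range prefix recomputed from scratch by an independent helper (stateless nested passes, O(m^2) per query) instead of A's single pass carrying state between outputs; A's dead 'if i==(j+1)' branch disappears.
import Mathlib
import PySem

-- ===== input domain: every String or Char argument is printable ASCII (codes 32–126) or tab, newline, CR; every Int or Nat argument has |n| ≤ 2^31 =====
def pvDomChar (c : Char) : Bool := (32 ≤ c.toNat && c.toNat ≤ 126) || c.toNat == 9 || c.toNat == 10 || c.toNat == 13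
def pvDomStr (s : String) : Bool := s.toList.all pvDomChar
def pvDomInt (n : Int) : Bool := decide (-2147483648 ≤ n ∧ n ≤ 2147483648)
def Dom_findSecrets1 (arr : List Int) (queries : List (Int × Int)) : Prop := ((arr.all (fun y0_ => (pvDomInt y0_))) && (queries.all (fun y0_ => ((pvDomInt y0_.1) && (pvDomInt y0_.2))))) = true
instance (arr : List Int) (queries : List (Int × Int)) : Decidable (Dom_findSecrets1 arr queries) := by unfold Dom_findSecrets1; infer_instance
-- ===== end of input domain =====

-- B drops A's running-product accumulator: each output is the product of its range
-- prefix recomputed from scratch by a stateless helper (alternative decomposition);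
-- A's `if i==(j+1)` branch is dead (the range is empty there) and disappears.

-- ===== PORT A =====
-- Inner loop state: (product, result).  The `if i == (j+1)` branch of A is unreachable
-- (inside the loop `index ∈ range(i, j+1)` forces i < j+1), so it is not ported.
def findSecrets1 (arr : List Int) (queries : List (Int × Int)) : List Int :=
  (queries.foldl
    (fun result ij =>
      ((PySem.List.pyRange ij.1 (ij.2 + 1) 1).foldl
        (fun (st : Int × List Int) index =>
          (st.1 * PySem.List.pyGetD arr index 0,
           st.2 ++ [st.1 * PySem.List.pyGetD arr index 0]))
        (1, result)).2)
    [])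

-- ===== PORT B =====
-- range_product(i, count): product of arr[i], …, arr[i+count-1], computed from scratch.
def pvRangeProduct (arr : List Int) (i : Int) (count : Int) : Int :=
  (PySem.List.pyRange 0 count 1).foldl
    (fun p t => p * PySem.List.pyGetD arr (i + t) 0) 1

def findSecrets1_alt (arr : List Int) (queries : List (Int × Int)) : List Int :=
  queries.foldl
    (fun result ij =>
      result ++
        (PySem.List.pyRange 0 (ij.2 - ij.1 + 1) 1).map
          (fun k => pvRangeProduct arr ij.1 (k + 1)))
    []

-- ===== PRECONDITION & SPEC =====
-- Pre_ excludes exactly the inputs on which Python A raises IndexError: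
-- a query (i, j) with a nonempty range whose indices are not all valid for arr.
def Pre_findSecrets1 (arr : List Int) (queries : List (Int × Int)) : Prop :=
  ∀ q ∈ queries, q.1 ≤ q.2 → (-(arr.length : Int) ≤ q.1 ∧ q.2 < (arr.length : Int))
instance (arr : List Int) (queries : List (Int × Int)) : Decidable (Pre_findSecrets1 arr queries) := by unfold Pre_findSecrets1; infer_instance

def pvWitness_findSecrets1 : List Int × (List (Int × Int)) := ([2, 3, 4], [(0, 1), (-2, 2)])

def Spec_findSecrets1 (arr : List Int) (queries : List (Int × Int)) (out : List Int) : Prop := out = findSecrets1_alt arr queries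
instance (arr : List Int) (queries : List (Int × Int)) (out : List Int) : Decidable (Spec_findSecrets1 arr queries out) := by unfold Spec_findSecrets1; infer_instance

-- ===== CLAIM (what is proved, stated in full; the proofs are below) =====
def Claim_equal_findSecrets1 : Prop := ∀ (arr : List Int) (queries : List (Int × Int)), Dom_findSecrets1 arr queries → Pre_findSecrets1 arr queries → Spec_findSecrets1 arr queries (findSecrets1 arr queries)

-- ===== LEMMAS AND PROOFS =====

-- prefix product of g (i + ·) over 0, …, n-1 (Nat form of pvRangeProduct)
def pvP (g : Int → Int) (i : Int) (n : Nat) : Int :=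
  (List.range n).foldl (fun p (t : Nat) => p * g (i + (t : Int))) 1

theorem pvP_succ (g : Int → Int) (i : Int) (n : Nat) :
    pvP g i (n + 1) = pvP g i n * g (i + (n : Int)) := by
  simp [pvP, List.range_succ]

-- A's inner scan, over indices i, i+1, …, written as a fold over List.range n,
-- equals the list of independently recomputed prefix products.
theorem inner_scan (g : Int → Int) (i : Int) (n : Nat) (res : List Int) :
    (List.range n).foldl
      (fun (st : Int × List Int) (k : Nat) =>
        (st.1 * g (i + (k : Int)), st.2 ++ [st.1 * g (i + (k : Int))]))
      (1, res)
    = (pvP g i n, res ++ (List.range n).map (fun k => pvP g i (k + 1))) := by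
  induction n with
  | zero => simp [pvP]
  | succ m ih =>
      simp only [List.range_succ, List.foldl_append, List.foldl_cons, List.foldl_nil, ih,
        List.map_append, List.map_cons, List.map_nil, pvP_succ]
      simp

-- per-query equality of the two ports' contributions
theorem query_eq (arr : List Int) (i j res : _) :
    ((PySem.List.pyRange i (j + 1) 1).foldl
        (fun (st : Int × List Int) index =>
          (st.1 * PySem.List.pyGetD arr index 0,
           st.2 ++ [st.1 * PySem.List.pyGetD arr index 0]))
        (1, res)).2
    = res ++ (PySem.List.pyRange 0 (j - i + 1) 1).map
        (fun k => pvRangeProduct arr i (k + 1)) := by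
  have hn : (j + 1 - i).toNat = (j - i + 1 - 0).toNat := by omega
  rw [PySem.List.pyRange_one i (j + 1), PySem.List.pyRange_one 0 (j - i + 1),
    List.foldl_map, List.map_map, hn]
  rw [inner_scan (fun idx => PySem.List.pyGetD arr idx 0) i]
  dsimp only
  congr 1
  apply List.map_congr_left
  intro k _
  simp only [Function.comp, pvRangeProduct]
  have hc : ((0 + (k : Int) + 1) - 0).toNat = k + 1 := by omega
  rw [PySem.List.pyRange_one, hc, List.foldl_map]
  simp [pvP]

-- ===== VERDICT (by name: the statement is the Claim_ definition above) =====
theorem findSecrets1_spec : Claim_equal_findSecrets1 := by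
  intro arr queries _ _
  unfold Spec_findSecrets1 findSecrets1 findSecrets1_alt
  induction queries using List.reverseRecOn with
  | nil => rfl
  | append_singleton qs q ih =>
      simp only [List.foldl_append, List.foldl_cons, List.foldl_nil, query_eq]
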